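-- pv_equiv track=rewrite | github.com/daodao1991/LeetCode | LeetCode_036/LeetCode036_ValidSudoku.py | IsSubBoxesValid
-- ===== SOURCE A (Python) =====
-- def IsSubBoxesValid(list_Board):
--     flag = True
--     for i in range(len(list_Board)):
--         L = list_Board[i]
--         list_L = []
--         for j in range(len(L)):
--             if L[j] == '.':
--                 continue
--             elif L[j] not in list_L:
--                 list_L.append(L[j])
--             else:
--                 flag = False
--                 break
--     if flag == False:
--             return False
--     return True
-- ===== SOURCE B (Python) =====
-- def IsSubBoxesValid(list_Board):
--     for row in list_Board:
--         digits = sorted(x for x in row if x != '.')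
--         if any(a == b for a, b in zip(digits, digits[1:])):
--             return False
--     return True
-- ===== Notes on version B (the rewrite author's own statement) =====
-- stated objective: alternative
-- what changed: Replaces A's incremental membership-list duplicate check by sort-based duplicate detection: sort each row's non-'.' entries and scan adjacent pairs for equality, returning False at the first bad row.
import Mathlib
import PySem

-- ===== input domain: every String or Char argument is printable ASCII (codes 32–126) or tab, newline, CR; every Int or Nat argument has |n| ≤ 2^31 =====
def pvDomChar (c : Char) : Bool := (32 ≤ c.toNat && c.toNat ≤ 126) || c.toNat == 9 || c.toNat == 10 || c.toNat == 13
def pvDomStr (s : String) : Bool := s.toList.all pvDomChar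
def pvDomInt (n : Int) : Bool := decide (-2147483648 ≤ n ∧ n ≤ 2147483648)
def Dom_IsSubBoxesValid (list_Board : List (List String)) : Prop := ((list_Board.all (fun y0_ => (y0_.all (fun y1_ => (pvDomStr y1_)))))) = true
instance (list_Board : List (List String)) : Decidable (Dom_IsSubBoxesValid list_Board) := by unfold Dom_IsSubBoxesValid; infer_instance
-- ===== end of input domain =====

-- B replaces A's incremental membership-list duplicate check by sort-based
-- duplicate detection (sort each row's non-'.' entries, scan adjacent pairs);
-- objective: alternative.

-- ===== PORT A =====
-- inner 'for j' loop of A: walks the row, growing list_L, 'continue' on '.',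
-- returns False (flag := False + break) on the first repeated entry
def pvInnerA : List String → List String → Bool → Bool
  | [], _, flag => flag
  | x :: rest, list_L, flag =>
    if x == "." then pvInnerA rest list_L flag
    else if !(list_L.contains x) then pvInnerA rest (list_L ++ [x]) flag
    else false

def IsSubBoxesValid (list_Board : List (List String)) : Bool :=
  let flag := list_Board.foldl (fun flag L => pvInnerA L [] flag) true
  if flag == false then false else true

-- ===== PORT B =====
-- 'for row in list_Board' with early 'return False'; sorted(...) is
-- PySem.List.sorted (identity key, reverse=False); 'zip(digits, digits[1:])'
-- is digits.zip (digits.drop 1) (xs[1:] on a list = drop 1).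
def IsSubBoxesValid_alt : List (List String) → Bool
  | [] => true
  | row :: rest =>
    let digits := PySem.List.sorted (row.filter (fun x => x != ".")) (fun x => x) false
    if (digits.zip (digits.drop 1)).any (fun p => p.1 == p.2) then false
    else IsSubBoxesValid_alt rest

-- ===== PRECONDITION & SPEC =====
def Spec_IsSubBoxesValid (list_Board : List (List String)) (out : Bool) : Prop := out = IsSubBoxesValid_alt list_Board
instance (list_Board : List (List String)) (out : Bool) : Decidable (Spec_IsSubBoxesValid list_Board out) := by unfold Spec_IsSubBoxesValid; infer_instance

-- ===== CLAIM (what is proved, stated in full; the proofs are below) =====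
def Claim_equal_IsSubBoxesValid : Prop := ∀ (list_Board : List (List String)), Dom_IsSubBoxesValid list_Board → Spec_IsSubBoxesValid list_Board (IsSubBoxesValid list_Board)

-- ===== LEMMAS AND PROOFS =====

theorem pvInnerA_cons (x : String) (rest acc : List String) (flag : Bool) :
    pvInnerA (x :: rest) acc flag =
      (if x == "." then pvInnerA rest acc flag
       else if !(acc.contains x) then pvInnerA rest (acc ++ [x]) flag
       else false) := rfl

-- moving a fresh element x from the 'seen' accumulator side to the list side
theorem cons_acc_iff {α : Type} (x : α) (l s : List α) (hx : x ∉ s) :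
    (l.Nodup ∧ ∀ y ∈ l, y ∉ s ++ [x]) ↔ ((x :: l).Nodup ∧ ∀ y ∈ x :: l, y ∉ s) := by
  constructor
  · rintro ⟨h1, h2⟩
    refine ⟨List.nodup_cons.2 ⟨fun hxr => (h2 x hxr) (List.mem_append.2 (Or.inr (List.mem_singleton.2 rfl))), h1⟩, ?_⟩
    intro y hy
    rcases List.mem_cons.1 hy with rfl | hys
    · exact hx
    · exact fun hys' => (h2 y hys) (List.mem_append.2 (Or.inl hys'))
  · rintro ⟨h1, h2⟩
    obtain ⟨hx', h1'⟩ := List.nodup_cons.1 h1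
    refine ⟨h1', fun y hy hmem => ?_⟩
    rcases List.mem_append.1 hmem with hys | hyx
    · exact h2 y (List.mem_cons.2 (Or.inr hy)) hys
    · exact hx' ((List.mem_singleton.1 hyx) ▸ hy)

-- the incoming flag threads through A's inner loop multiplicatively
theorem pvInnerA_flag (L : List String) : ∀ (acc : List String) (flag : Bool),
    pvInnerA L acc flag = (flag && pvInnerA L acc true) := by
  induction L with
  | nil => intro acc flag; cases flag <;> simp [pvInnerA]
  | cons x rest ih =>
    intro acc flag
    rw [pvInnerA_cons, pvInnerA_cons]
    by_cases hx : (x == ".") = true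
    · rw [if_pos hx, if_pos hx, ih]
    · rw [if_neg hx, if_neg hx]
      by_cases hm : acc.contains x = true
      · rw [if_neg (by rw [hm]; simp), if_neg (by rw [hm]; simp)]; simp
      · simp only [hm, Bool.not_false, if_true]; rw [ih]

-- A's inner loop succeeds iff the row's non-'.' entries are pairwise distinct
-- and none already lies in the accumulator
theorem pvInnerA_char (L : List String) : ∀ (acc : List String),
    (pvInnerA L acc true = true) ↔
      ((L.filter (fun x => x != ".")).Nodup ∧ ∀ x ∈ L.filter (fun x => x != "."), x ∉ acc) := by
  induction L with
  | nil => intro acc; simp [pvInnerA]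
  | cons x rest ih =>
    intro acc
    rw [pvInnerA_cons]
    by_cases hx : (x == ".") = true
    · have hx' : x = "." := by simpa using hx
      subst hx'
      rw [if_pos hx, ih]
      simp
    · have hx' : x ≠ "." := by simpa using hx
      have hfil : (x :: rest).filter (fun y => y != ".") =
          x :: rest.filter (fun y => y != ".") := by
        simp [hx']
      rw [if_neg hx, hfil]
      by_cases hm : acc.contains x = true
      · have hxmem : x ∈ acc := by simpa using hm
        rw [if_neg (by rw [hm]; simp)]
        simp only [Bool.false_eq_true, false_iff, not_and]
        intro _ hall
        exact hall x List.mem_cons_self hxmem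
      · have hxnot : x ∉ acc := by simpa using hm
        simp only [hm, Bool.not_false, if_true]
        rw [ih]
        exact cons_acc_iff x (rest.filter (fun y => y != ".")) acc hxnot

-- on a ≤-sorted list, an adjacent equal pair exists iff the list has a duplicate
theorem adj_dup_of_sorted (l : List String) (hs : l.Pairwise (· ≤ ·)) :
    ((l.zip (l.drop 1)).any (fun p => p.1 == p.2) = true) ↔ ¬ l.Nodup := by
  induction l with
  | nil => simp
  | cons a t ih =>
    cases t with
    | nil => simp
    | cons b r =>
      obtain ⟨ha, ht⟩ := List.pairwise_cons.1 hs
      have hab : a ≤ b := ha b List.mem_cons_self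
      by_cases heq : a = b
      · subst heq
        simp [List.zip, List.nodup_cons]
      · have hzip : ((a :: b :: r).zip ((a :: b :: r).drop 1)) =
            (a, b) :: ((b :: r).zip ((b :: r).drop 1)) := rfl
        have hnab : (a == b) = false := by simpa using heq
        rw [hzip, List.any_cons]
        simp only [hnab, Bool.false_or]
        rw [ih ht]
        have hanotin : a ∉ b :: r := by
          have hlt : a < b := lt_of_le_of_ne hab heq
          intro hmem
          rcases List.mem_cons.1 hmem with rfl | hmr
          · exact heq rfl
          · obtain ⟨hb, -⟩ := List.pairwise_cons.1 ht
            exact absurd (hlt.trans_le (hb a hmr)) (lt_irrefl a)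
        constructor
        · intro hnd hc
          exact hnd (List.nodup_cons.1 hc).2
        · intro hc hnd
          exact hc (List.nodup_cons.2 ⟨hanotin, hnd⟩)

-- B's per-row sorted adjacent scan detects exactly the non-Nodup rows
theorem row_test_b (row : List String) :
    (((PySem.List.sorted (row.filter (fun x => x != ".")) (fun x => x) false).zip
        ((PySem.List.sorted (row.filter (fun x => x != ".")) (fun x => x) false).drop 1)).any
        (fun p => p.1 == p.2) = true)
      ↔ ¬ (row.filter (fun x => x != ".")).Nodup := by
  set d := row.filter (fun x => x != ".") with hd
  have hperm : (PySem.List.sorted d (fun x => x) false).Perm d := PySem.List.sorted_perm d _ _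
  have hpw : (PySem.List.sorted d (fun x => x) false).Pairwise (· ≤ ·) :=
    PySem.List.sorted_pairwise d (fun x => x)
  rw [adj_dup_of_sorted _ hpw, hperm.nodup_iff]

-- B's early-return recursion is 'all rows have duplicate-free non-. entries'
theorem alt_eq_all (lb : List (List String)) :
    IsSubBoxesValid_alt lb =
      lb.all (fun L => decide (L.filter (fun x => x != ".")).Nodup) := by
  induction lb with
  | nil => rfl
  | cons row rest ih =>
    simp only [IsSubBoxesValid_alt, List.all_cons, ih]
    by_cases h : (row.filter (fun x => x != ".")).Nodup
    · rw [if_neg (by rw [row_test_b row]; simpa using h)]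
      simp [h]
    · rw [if_pos (by rw [row_test_b row]; simpa using h)]
      simp [h]

-- A's outer fold computes the same 'all rows' predicate
theorem a_foldl (lb : List (List String)) : ∀ (b : Bool),
    lb.foldl (fun flag L => pvInnerA L [] flag) b
      = (b && lb.all (fun L => decide (L.filter (fun x => x != ".")).Nodup)) := by
  induction lb with
  | nil => intro b; simp
  | cons row rest ih =>
    intro b
    have hrow : pvInnerA row [] true = decide (row.filter (fun x => x != ".")).Nodup := by
      by_cases h : (row.filter (fun x => x != ".")).Nodup
      · simp only [h, decide_true]
        exact (pvInnerA_char row []).2 ⟨h, by simp⟩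
      · have hne : ¬ pvInnerA row [] true = true := fun hc =>
          h ((pvInnerA_char row []).1 hc).1
        simp only [h, decide_false]
        simpa using hne
    rw [List.foldl_cons, List.all_cons, ih, pvInnerA_flag row [] b, hrow,
      Bool.and_assoc]

-- ===== VERDICT (by name: the statement is the Claim_ definition above) =====
theorem IsSubBoxesValid_spec : Claim_equal_IsSubBoxesValid := by
  intro lb _
  unfold Spec_IsSubBoxesValid IsSubBoxesValid
  rw [alt_eq_all, a_foldl]
  cases lb.all (fun L => decide (L.filter (fun x => x != ".")).Nodup) <;> simp
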